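-- pv_equiv track=rewrite | github.com/Talon24/explore | explor.py | _fold_list
-- ===== SOURCE A (Python) =====
-- import itertools
--
-- def _fold_list(data, columns):
--     """Convert one column of data to <columns> columns, aligned."""
--     rows, remainder = divmod(len(data), columns)
--     chunked = (data[col * rows + min(col, remainder):(col + 1) * rows + min(col + 1, remainder)]
--                for col in range(columns))
--     folded = [["{item:{length}}".format(item=cell, length=max(len(cell_) for cell_ in col))
--                for cell in col]
--               for col in chunked]
--     block = [" ".join(items) for items in itertools.zip_longest(*folded, fillvalue="")]
--     return block
-- ===== SOURCE B (Python) =====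
-- def _fold_list(data, columns):
--     """Convert one column of data to <columns> columns, aligned."""
--     rows, remainder = divmod(len(data), columns)
--     nrows = rows + (1 if remainder else 0)
--     split = remainder * (rows + 1)
--
--     def place(i):
--         """Invert the chunk arithmetic: flat index -> (column, row)."""
--         if i < split:
--             return divmod(i, rows + 1)
--         col, row = divmod(i - split, rows)
--         return remainder + col, row
--
--     widths = {}
--     for i, cell in enumerate(data):
--         col = place(i)[0]
--         widths[col] = max(widths.get(col, 0), len(cell))
--     lines = {}
--     for i, cell in enumerate(data):
--         col, row = place(i)
--         lines.setdefault(row, []).append(cell.ljust(widths[col]))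
--     return [" ".join(lines.get(r, []) + [""] * (columns - len(lines.get(r, []))))
--             for r in range(nrows)]
-- ===== Notes on version B (the rewrite author's own statement) =====
-- stated objective: faster
-- what changed: B never slices the data into columns and never transposes with itertools.zip_longest: it makes one enumeration of the flat list, inverts the chunk arithmetic per index (divmod -> (column, row)), and scatters each cell into a width table and a row dictionary, then emits the rows from the dictionary; the per-column width is computed once instead of A's per-cell max over the whole column.
import Mathlib
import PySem

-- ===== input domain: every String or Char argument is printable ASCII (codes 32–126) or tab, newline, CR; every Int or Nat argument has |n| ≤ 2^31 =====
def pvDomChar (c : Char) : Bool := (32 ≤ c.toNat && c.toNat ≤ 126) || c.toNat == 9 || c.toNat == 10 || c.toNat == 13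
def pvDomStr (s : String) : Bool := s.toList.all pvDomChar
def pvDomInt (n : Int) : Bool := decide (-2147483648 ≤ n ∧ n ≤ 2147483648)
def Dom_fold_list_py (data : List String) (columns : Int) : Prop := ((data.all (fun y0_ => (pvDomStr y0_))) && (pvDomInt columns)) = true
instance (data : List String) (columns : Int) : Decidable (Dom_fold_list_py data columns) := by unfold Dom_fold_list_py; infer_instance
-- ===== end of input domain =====

-- B replaces A's column slicing + zip_longest by ONE enumeration of the data that inverts the
-- chunk arithmetic (flat index -> (column, row) by divmod) and scatters each cell into a width
-- table and a row dictionary; equal return value for every columns ≠ 0.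

-- ===== PORT A =====
-- "{item:{length}}".format(item=cell, length=w) for a str cell is left-justified
-- space-padding to minimum width w (exact; shared with B's str.ljust, which is the same operation).
def pvPad (s : String) (w : Int) : String :=
  String.ofList (s.toList ++ List.replicate (w - (s.toList.length : Int)).toNat ' ')

-- itertools.zip_longest(*cols, fillvalue="") as a list of rows, step for step:
-- emit one row of heads (missing → "") while some column is nonempty.
def pvZipLongest (cols : List (List String)) : List (List String) :=
  if cols.isEmpty || cols.all List.isEmpty then []
  else (cols.map (fun c => c.headD "")) :: pvZipLongest (cols.map List.tail)
termination_by (cols.map List.length).sum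
decreasing_by
  rename_i h
  simp only [Bool.or_eq_true, List.isEmpty_iff, List.all_eq_true, not_or] at h
  obtain ⟨-, hex⟩ := h
  rw [Classical.not_forall] at hex
  obtain ⟨c, hc⟩ := hex
  rw [Classical.not_imp] at hc
  obtain ⟨hcmem, hcne⟩ := hc
  simp only [List.map_subtype, List.unattach_attach, List.map_map]
  refine List.sum_lt_sum _ _ ?_ ⟨c, hcmem, ?_⟩
  · intro x _; simp [List.length_tail]
  · have : c ≠ [] := by simpa [List.isEmpty_iff] using hcne
    have : 0 < c.length := List.length_pos_iff.mpr this
    simp only [Function.comp, List.length_tail]; omega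

def fold_list_py (data : List String) (columns : Int) : List String :=
  match PySem.Int.divmod? (data.length : Int) columns with
  | none => []  -- columns == 0: Python raises ZeroDivisionError (excluded by Pre_)
  | some (rows, remainder) =>
    let chunked := (PySem.List.pyRange 0 columns 1).map (fun col =>
      PySem.List.slice data (some (col * rows + min col remainder))
        (some ((col + 1) * rows + min (col + 1) remainder)))
    let folded := chunked.map (fun col =>
      col.map (fun cell =>
        -- max(len(cell_) for cell_ in col): evaluated only when col has a cell, so the
        -- .getD 0 arm (Python: ValueError on empty) is unreachable here
        pvPad cell ((PySem.List.max? (col.map PySem.Str.len) (fun x => x)).getD 0)))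
    (pvZipLongest folded).map (fun items => PySem.Str.join " " items)

-- ===== PORT B =====
-- place(i): flat index -> (column, row).  The divisors rows+1 / rows are used only on the
-- branches where B's Python reaches them with a nonzero divisor (i < split forces rows+1 ≥ 1,
-- the else branch forces rows ≠ 0), so the total floordiv/mod are exact there.
def pvPlace (i split rows rem : Int) : Int × Int :=
  if i < split then (PySem.Int.floordiv i (rows + 1), PySem.Int.mod i (rows + 1))
  else (rem + PySem.Int.floordiv (i - split) rows, PySem.Int.mod (i - split) rows)

def fold_list_py_alt (data : List String) (columns : Int) : List String :=
  match PySem.Int.divmod? (data.length : Int) columns with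
  | none => []  -- columns == 0: Python raises ZeroDivisionError (excluded by Pre_)
  | some (rows, rem) =>
    let nrows := rows + (if rem = 0 then 0 else 1)
    let split := rem * (rows + 1)
    let widths := (PySem.List.enumerate data).foldl
      (fun (w : PySem.Dict Int Int) ic =>
        w.insert (pvPlace ic.1 split rows rem).1
          (max (w.getD (pvPlace ic.1 split rows rem).1 0) (PySem.Str.len ic.2)))
      PySem.Dict.empty
    let lines := (PySem.List.enumerate data).foldl
      (fun (L : PySem.Dict Int (List String)) ic =>
        L.insert (pvPlace ic.1 split rows rem).2
          (L.getD (pvPlace ic.1 split rows rem).2 [] ++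
            [pvPad ic.2 (widths.getD (pvPlace ic.1 split rows rem).1 0)]))
      PySem.Dict.empty
    (PySem.List.pyRange 0 nrows 1).map (fun r =>
      PySem.Str.join " " (lines.getD r [] ++
        List.replicate ((columns - ((lines.getD r []).length : Int)).toNat) ""))

-- ===== PRECONDITION & SPEC =====
-- Pre_ excludes only columns = 0, where Python A (and B) raise ZeroDivisionError.
def Pre_fold_list_py (data : List String) (columns : Int) : Prop := columns ≠ 0
instance (data : List String) (columns : Int) : Decidable (Pre_fold_list_py data columns) := by unfold Pre_fold_list_py; infer_instance

def pvWitness_fold_list_py : List String × Int := (["ab", "c", "d"], 2)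

def Spec_fold_list_py (data : List String) (columns : Int) (out : List String) : Prop := out = fold_list_py_alt data columns
instance (data : List String) (columns : Int) (out : List String) : Decidable (Spec_fold_list_py data columns out) := by unfold Spec_fold_list_py; infer_instance

-- ===== CLAIM (what is proved, stated in full; the proofs are below) =====
def Claim_equal_fold_list_py : Prop := ∀ (data : List String) (columns : Int), Dom_fold_list_py data columns → Pre_fold_list_py data columns → Spec_fold_list_py data columns (fold_list_py data columns)

-- ===== LEMMAS AND PROOFS =====

-- chunk geometry: start offset and length of column c
def pvStart (rows rem c : Int) : Int := c * rows + min c rem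
def pvLenC (rows rem c : Int) : Int := rows + (if c < rem then 1 else 0)
-- flat indices of column c
def pvBlock (rows rem c : Int) : List Int :=
  PySem.List.pyRange (pvStart rows rem c) (pvStart rows rem (c + 1)) 1
-- A's per-column width: max(len(cell_) for cell_ in chunk) (0 for an empty chunk)
def pvWidth (data : List String) (rows rem c : Int) : Int :=
  (PySem.List.max? ((PySem.List.slice data (some (pvStart rows rem c))
      (some (pvStart rows rem (c + 1)))).map PySem.Str.len) (fun x => x)).getD 0
-- number of cells in row r
def pvK (rows rem columns r : Int) : Int := if r < rows then columns else rem
-- the common row/column table both programs compute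
def pvTable (data : List String) (columns rows rem : Int) : List String :=
  (PySem.List.pyRange 0 (rows + (if rem = 0 then 0 else 1)) 1).map (fun r =>
    PySem.Str.join " " ((PySem.List.pyRange 0 columns 1).map (fun c =>
      if r < pvLenC rows rem c then
        pvPad (PySem.List.pyGetD data (pvStart rows rem c + r) "") (pvWidth data rows rem c)
      else "")))

lemma pvStart_succ (rows rem c : Int) :
    pvStart rows rem (c + 1) = pvStart rows rem c + pvLenC rows rem c := by
  unfold pvStart pvLenC
  have h : (c + 1) * rows = c * rows + rows := by ring
  rw [h]; split_ifs <;> omega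

lemma pvStart_nonneg (rows rem c : Int) (hrows : 0 ≤ rows) (hrem : 0 ≤ rem) (hc : 0 ≤ c) :
    0 ≤ pvStart rows rem c := by
  unfold pvStart
  have := mul_nonneg hc hrows
  omega

lemma pvLenC_nonneg (rows rem c : Int) (hrows : 0 ≤ rows) : 0 ≤ pvLenC rows rem c := by
  unfold pvLenC; split_ifs <;> omega

lemma pvStart_zero (rows rem : Int) (hrem : 0 ≤ rem) : pvStart rows rem 0 = 0 := by
  unfold pvStart; omega

lemma pvStart_cols (rows rem columns : Int) (hrem : 0 ≤ rem) (hremc : rem < columns) :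
    pvStart rows rem columns = rows * columns + rem := by
  unfold pvStart
  have h : columns * rows = rows * columns := by ring
  omega

-- the flat index range is the concatenation of the column blocks
lemma pv_range_flat (rows rem : Int) (hrows : 0 ≤ rows) (hrem : 0 ≤ rem) (k : Nat) :
    PySem.List.pyRange 0 (pvStart rows rem (k : Int)) 1
      = (PySem.List.pyRange 0 (k : Int) 1).flatMap (pvBlock rows rem) := by
  induction k with
  | zero =>
    simp only [Nat.cast_zero]
    rw [pvStart_zero _ _ hrem]
    rw [PySem.List.pyRange_one_eq_nil (le_refl 0)]
    rfl
  | succ k ih =>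
    have hc : ((k + 1 : Nat) : Int) = (k : Int) + 1 := by push_cast; ring
    rw [hc, PySem.List.pyRange_one_succ_right (by positivity), List.flatMap_append, ← ih]
    have h0 : 0 ≤ pvStart rows rem (k : Int) :=
      pvStart_nonneg _ _ _ hrows hrem (by positivity)
    have h1 : pvStart rows rem (k : Int) ≤ pvStart rows rem ((k : Int) + 1) := by
      rw [pvStart_succ]
      have := pvLenC_nonneg rows rem (k : Int) hrows
      omega
    rw [PySem.List.pyRange_one_append 0 (pvStart rows rem (k : Int))
      (pvStart rows rem ((k : Int) + 1)) h0 h1]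
    simp [pvBlock]

-- place inverts the chunk arithmetic on block c
lemma pv_place_spec (rows rem c t : Int) (hrows : 0 ≤ rows) (hrem0 : 0 ≤ rem)
    (hc0 : 0 ≤ c) (ht0 : 0 ≤ t) (htl : t < pvLenC rows rem c) :
    pvPlace (pvStart rows rem c + t) (rem * (rows + 1)) rows rem = (c, t) := by
  unfold pvPlace pvStart pvLenC at *
  by_cases hc : c < rem
  · have hmin : min c rem = c := by omega
    rw [if_pos (by omega)] at htl
    have hlt : c * rows + min c rem + t < rem * (rows + 1) := by
      have h1 : (c + 1) * rows ≤ rem * rows :=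
        mul_le_mul_of_nonneg_right (by omega) hrows
      have h2 : (c + 1) * rows = c * rows + rows := by ring
      have h3 : rem * (rows + 1) = rem * rows + rem := by ring
      omega
    rw [if_pos hlt]
    have hd : PySem.Int.floordiv (c * rows + min c rem + t) (rows + 1) = c := by
      rw [PySem.Int.floordiv_eq_iff_of_pos (by omega)]
      have h2 : (c + 1) * (rows + 1) = c * (rows + 1) + rows + 1 := by ring
      have h3 : c * (rows + 1) = c * rows + c := by ring
      omega
    have hm := PySem.Int.floordiv_mul_add_mod (c * rows + min c rem + t) (rows + 1)
    rw [hd] at hm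
    have hmod : PySem.Int.mod (c * rows + min c rem + t) (rows + 1) = t := by
      have h3 : c * (rows + 1) = c * rows + c := by ring
      omega
    rw [Prod.mk.injEq]
    exact ⟨hd, hmod⟩
  · have hmin : min c rem = rem := by omega
    rw [if_neg hc] at htl
    have hrpos : 0 < rows := by omega
    have hge : ¬ (c * rows + min c rem + t < rem * (rows + 1)) := by
      have h1 : rem * rows ≤ c * rows := mul_le_mul_of_nonneg_right (by omega) hrows
      have h3 : rem * (rows + 1) = rem * rows + rem := by ring
      omega
    rw [if_neg hge]
    have harg : c * rows + min c rem + t - rem * (rows + 1) = (c - rem) * rows + t := by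
      have h3 : rem * (rows + 1) = rem * rows + rem := by ring
      have h4 : (c - rem) * rows = c * rows - rem * rows := by ring
      omega
    have hd : PySem.Int.floordiv (c * rows + min c rem + t - rem * (rows + 1)) rows = c - rem := by
      rw [harg, PySem.Int.floordiv_eq_iff_of_pos hrpos]
      have h2 : (c - rem + 1) * rows = (c - rem) * rows + rows := by ring
      omega
    have hm := PySem.Int.floordiv_mul_add_mod (c * rows + min c rem + t - rem * (rows + 1)) rows
    rw [hd] at hm
    have hmod : PySem.Int.mod (c * rows + min c rem + t - rem * (rows + 1)) rows = t := by
      rw [harg] at hm ⊢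
      omega
    rw [Prod.mk.injEq]
    constructor
    · rw [hd]; ring
    · exact hmod

-- the two scatter loops: looking up key c after a 'd[k] = f(d.get(k, d0), x)' loop
-- replays f over exactly the elements keyed c
lemma pv_getD_foldl_insert {ν β : Type} (g : β → Int) (v : ν → β → ν) (d0 : ν)
    (l : List β) (d : PySem.Dict Int ν) (c : Int) :
    (l.foldl (fun d b => d.insert (g b) (v (d.getD (g b) d0) b)) d).getD c d0
      = (l.filter (fun b => g b == c)).foldl v (d.getD c d0) := by
  induction l generalizing d with
  | nil => rfl
  | cons b t ih =>
    simp only [List.foldl_cons, List.filter_cons]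
    by_cases hb : g b = c
    · simp only [hb, beq_self_eq_true, if_true, List.foldl_cons]
      rw [ih]
      rw [PySem.Dict.getD_insert_self]
    · have hbeq : (g b == c) = false := by simp [hb]
      rw [hbeq, if_neg (by simp)]
      rw [ih, PySem.Dict.getD_insert_of_ne _ _ _ (fun h => hb h.symm)]

-- filter for one value in an integer range
lemma pv_filter_range_aux (b x : Int) : ∀ (n : Nat) (a : Int), (b - a).toNat = n →
    (PySem.List.pyRange a b 1).filter (fun j => j == x)
      = if a ≤ x ∧ x < b then [x] else [] := by
  intro n
  induction n with
  | zero =>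
    intro a hn
    rw [PySem.List.pyRange_one_eq_nil (by omega)]
    rw [if_neg (by omega)]
    rfl
  | succ n ih =>
    intro a hn
    have hab : a < b := by omega
    rw [PySem.List.pyRange_one_cons hab, List.filter_cons]
    by_cases hax : a = x
    · subst hax
      simp only [beq_self_eq_true, if_true]
      rw [ih (a + 1) (by omega), if_neg (by omega), if_pos (by omega)]
    · have : (a == x) = false := by simp [hax]
      rw [this, if_neg (by simp)]
      rw [ih (a + 1) (by omega)]
      by_cases hx : a ≤ x ∧ x < b
      · rw [if_pos (by omega), if_pos hx]
      · rw [if_neg (by omega), if_neg hx]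

lemma pv_filter_range (a b x : Int) :
    (PySem.List.pyRange a b 1).filter (fun j => j == x)
      = if a ≤ x ∧ x < b then [x] else [] :=
  pv_filter_range_aux b x (b - a).toNat a rfl

-- flatMap of an if-singleton body over a Nodup list collapses to the one hit
lemma pv_flatMap_single {α : Type} (c : Int) (g : Int → List α) :
    ∀ (l : List Int), l.Nodup → c ∈ l →
    (l.flatMap (fun x => if x = c then g x else [])) = g c := by
  intro l
  induction l with
  | nil => intro _ h; cases h
  | cons x t ih =>
    intro hnd hm
    rw [List.flatMap_cons]
    rcases List.mem_cons.mp hm with rfl | h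
    · rw [if_pos rfl]
      have hniet : ∀ y ∈ t, (if y = c then g y else []) = ([] : List α) := by
        intro y hy
        rw [if_neg]
        intro he; rw [he] at hy
        exact (List.nodup_cons.mp hnd).1 hy
      rw [List.flatMap_congr hniet]
      simp
    · have hx : x ≠ c := by
        intro he; subst he
        exact (List.nodup_cons.mp hnd).1 h
      rw [if_neg hx, ih (List.nodup_cons.mp hnd).2 h]
      simp

-- membership in block c is exactly start c + t for 0 ≤ t < len c
lemma pv_mem_block (rows rem c j : Int) (h : j ∈ pvBlock rows rem c) :
    pvStart rows rem c ≤ j ∧ j < pvStart rows rem c + pvLenC rows rem c := by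
  unfold pvBlock at h
  rw [PySem.List.mem_pyRange_one] at h
  rw [pvStart_succ] at h
  exact h

-- slice = pyGetD over the index block (the two programs read the same cells)
lemma pv_slice_as_map (data : List String) (a b : Int) (h0 : 0 ≤ a) (hab : a ≤ b)
    (hb : b ≤ (data.length : Int)) :
    PySem.List.slice data (some a) (some b)
      = (PySem.List.pyRange a b 1).map (fun j => PySem.List.pyGetD data j "") := by
  rw [PySem.List.slice_of_nonneg data h0 (le_trans h0 hab) (le_trans hab hb) hb]
  apply List.ext_getElem
  · rw [List.length_map, PySem.List.length_pyRange_one]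
    simp only [List.length_take, List.length_drop]
    omega
  · intro i h1 h2
    rw [List.length_map, PySem.List.length_pyRange_one] at h2
    rw [List.getElem_map, PySem.List.getElem_pyRange_one]
    simp only [List.length_take, List.length_drop] at h1
    rw [List.getElem_take, List.getElem_drop]
    have hlo : 0 ≤ a + (i : Int) := by omega
    have hhi : a + (i : Int) < (data.length : Int) := by omega
    rw [PySem.List.pyGetD_eq_getElem data "" hlo hhi]
    congr 1
    omega

-- max(...) with default .getD 0 is the running max from 0 over a nonneg list
lemma pv_width_foldl (x : Int) (t : List Int) (hx : 0 ≤ x) :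
    (PySem.List.max? (x :: t) (fun y => y)).getD 0 = (x :: t).foldl max 0 := by
  rw [PySem.List.max?_id_cons]
  simp only [Option.getD_some, List.foldl_cons]
  rw [max_eq_right hx]

lemma pv_len_nonneg (s : String) : 0 ≤ PySem.Str.len s := Int.zero_le_ofNat s.toList.length

lemma pv_start_le (rows rem c columns : Int) (hrows : 0 ≤ rows) (hrem : 0 ≤ rem)
    (hc : c ≤ columns) : pvStart rows rem c ≤ rows * columns + rem := by
  unfold pvStart
  have h1 : 0 ≤ (columns - c) * rows := mul_nonneg (by omega) hrows
  have h2 : (columns - c) * rows = columns * rows - c * rows := by ring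
  have h3 : columns * rows = rows * columns := by ring
  omega

-- the flat index range splits into the column blocks
lemma pv_range_blocks (data : List String) (columns rows rem : Int) (h : 0 < columns)
    (hrows0 : 0 ≤ rows) (hrem0 : 0 ≤ rem) (hremc : rem < columns)
    (hid : rows * columns + rem = (data.length : Int)) :
    PySem.List.pyRange 0 (data.length : Int) 1
      = (PySem.List.pyRange 0 columns 1).flatMap (pvBlock rows rem) := by
  have hcol : ((columns.toNat : Nat) : Int) = columns := Int.toNat_of_nonneg (le_of_lt h)
  have hfl := pv_range_flat rows rem hrows0 hrem0 columns.toNat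
  rw [hcol] at hfl
  rw [← hid, ← pvStart_cols rows rem columns hrem0 hremc]
  exact hfl

-- filtering a block by the placed column index
lemma pv_block_filter_fst (rows rem c c' : Int)
    (hrows0 : 0 ≤ rows) (hrem0 : 0 ≤ rem) (hc'0 : 0 ≤ c') :
    (pvBlock rows rem c').filter
        (fun j => (pvPlace j (rem * (rows + 1)) rows rem).1 == c)
      = if c' = c then pvBlock rows rem c' else [] := by
  have hcong : ∀ j ∈ pvBlock rows rem c',
      ((pvPlace j (rem * (rows + 1)) rows rem).1 == c) = (c' == c) := by
    intro j hj
    obtain ⟨hj1, hj2⟩ := pv_mem_block rows rem c' j hj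
    have hpl := pv_place_spec rows rem c' (j - pvStart rows rem c') hrows0 hrem0 hc'0
      (by omega) (by omega)
    have hj' : pvStart rows rem c' + (j - pvStart rows rem c') = j := by omega
    rw [hj'] at hpl
    rw [hpl]
  rw [List.filter_congr hcong]
  by_cases hcc : c' = c
  · rw [if_pos hcc]
    have : (c' == c) = true := by simp [hcc]
    simp [this]
  · rw [if_neg hcc]
    have : (c' == c) = false := by simp [hcc]
    simp [this]

-- filtering a block by the placed row index
lemma pv_block_filter_snd (rows rem c r : Int)
    (hrows0 : 0 ≤ rows) (hrem0 : 0 ≤ rem) (hc0 : 0 ≤ c) (hr0 : 0 ≤ r) :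
    (pvBlock rows rem c).filter
        (fun j => (pvPlace j (rem * (rows + 1)) rows rem).2 == r)
      = if r < pvLenC rows rem c then [pvStart rows rem c + r] else [] := by
  have hcong : ∀ j ∈ pvBlock rows rem c,
      ((pvPlace j (rem * (rows + 1)) rows rem).2 == r) = (j == pvStart rows rem c + r) := by
    intro j hj
    obtain ⟨hj1, hj2⟩ := pv_mem_block rows rem c j hj
    have hpl := pv_place_spec rows rem c (j - pvStart rows rem c) hrows0 hrem0 hc0
      (by omega) (by omega)
    have hj' : pvStart rows rem c + (j - pvStart rows rem c) = j := by omega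
    rw [hj'] at hpl
    rw [hpl]
    exact decide_eq_decide.mpr (by omega)
  rw [List.filter_congr hcong]
  unfold pvBlock
  rw [pv_filter_range]
  rw [pvStart_succ]
  by_cases hr : r < pvLenC rows rem c
  · rw [if_pos (by omega), if_pos hr]
  · rw [if_neg (by omega), if_neg hr]

-- the width table holds A's per-column width
lemma pv_widths (data : List String) (columns rows rem c : Int) (h : 0 < columns)
    (hrows0 : 0 ≤ rows) (hrem0 : 0 ≤ rem) (hremc : rem < columns)
    (hid : rows * columns + rem = (data.length : Int))
    (hc0 : 0 ≤ c) (hcc : c < columns) :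
    ((PySem.List.enumerate data).foldl
      (fun (w : PySem.Dict Int Int) ic =>
        w.insert (pvPlace ic.1 (rem * (rows + 1)) rows rem).1
          (max (w.getD (pvPlace ic.1 (rem * (rows + 1)) rows rem).1 0) (PySem.Str.len ic.2)))
      PySem.Dict.empty).getD c 0 = pvWidth data rows rem c := by
  have h1 := pv_getD_foldl_insert (fun (ic : Int × String) => (pvPlace ic.1 (rem * (rows + 1)) rows rem).1)
    (fun acc ic => max acc (PySem.Str.len ic.2)) 0 (PySem.List.enumerate data) PySem.Dict.empty c
  simp only [] at h1
  rw [h1]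
  rw [PySem.List.enumerate_eq_map_pyRange (d := "")]
  rw [List.filter_map, List.foldl_map]
  simp only [Function.comp_def]
  have hlen : PySem.List.len data = (data.length : Int) := rfl
  rw [hlen, pv_range_blocks data columns rows rem h hrows0 hrem0 hremc hid]
  rw [List.filter_flatMap]
  have hbl : ∀ c' ∈ PySem.List.pyRange 0 columns 1,
      (pvBlock rows rem c').filter
          (fun j => (pvPlace j (rem * (rows + 1)) rows rem).1 == c)
        = if c' = c then pvBlock rows rem c' else [] := by
    intro c' hc'
    obtain ⟨h1, h2⟩ := PySem.List.mem_pyRange_one.mp hc'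
    exact pv_block_filter_fst rows rem c c' hrows0 hrem0 h1
  rw [List.flatMap_congr hbl]
  rw [pv_flatMap_single c (pvBlock rows rem) _ (PySem.List.nodup_pyRange_one 0 columns)
    (PySem.List.mem_pyRange_one.mpr ⟨hc0, hcc⟩)]
  -- RHS
  unfold pvWidth
  have hs0 : 0 ≤ pvStart rows rem c := pvStart_nonneg rows rem c hrows0 hrem0 hc0
  have hss : pvStart rows rem c ≤ pvStart rows rem (c + 1) := by
    rw [pvStart_succ]; have := pvLenC_nonneg rows rem c hrows0; omega
  have hsn : pvStart rows rem (c + 1) ≤ (data.length : Int) := by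
    rw [← hid]; exact pv_start_le rows rem (c + 1) columns hrows0 hrem0 (by omega)
  rw [pv_slice_as_map data _ _ hs0 hss hsn, List.map_map]
  simp only [Function.comp_def]
  have hbl2 : PySem.List.pyRange (pvStart rows rem c) (pvStart rows rem (c + 1)) 1
      = pvBlock rows rem c := rfl
  rw [hbl2]
  rcases hB : pvBlock rows rem c with _ | ⟨j, t⟩
  · simp [PySem.Dict.getD_empty, PySem.List.max?]
  · rw [List.map_cons, pv_width_foldl _ _ (pv_len_nonneg _)]
    have hfm := List.foldl_map (f := fun x => PySem.Str.len (PySem.List.pyGetD data x ""))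
      (g := max) (l := j :: t) (init := (0 : Int))
    simp only [List.map_cons] at hfm
    rw [hfm]
    simp [PySem.Dict.getD_empty]

lemma pv_k_bounds (rows rem columns r : Int) (hrem0 : 0 ≤ rem) (hremc : rem < columns)
    (h : 0 < columns) : 0 ≤ pvK rows rem columns r ∧ pvK rows rem columns r ≤ columns := by
  unfold pvK; split_ifs <;> omega

-- row r has a cell in column c iff c < pvK r
lemma pv_k_iff (rows rem columns r c : Int) (hr0 : 0 ≤ r)
    (hrn : r < rows + (if rem = 0 then 0 else 1)) (hc0 : 0 ≤ c) (hcc : c < columns) :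
    (r < pvLenC rows rem c) ↔ (c < pvK rows rem columns r) := by
  unfold pvLenC pvK
  split_ifs at hrn ⊢ <;> omega

-- the row dictionary holds, at key r, exactly row r's padded cells in column order
lemma pv_lines (data : List String) (columns rows rem r : Int) (W : PySem.Dict Int Int)
    (h : 0 < columns) (hrows0 : 0 ≤ rows) (hrem0 : 0 ≤ rem) (hremc : rem < columns)
    (hid : rows * columns + rem = (data.length : Int))
    (hr0 : 0 ≤ r) (hrn : r < rows + (if rem = 0 then 0 else 1))
    (hW : ∀ c, 0 ≤ c → c < columns → W.getD c 0 = pvWidth data rows rem c) :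
    ((PySem.List.enumerate data).foldl
      (fun (L : PySem.Dict Int (List String)) ic =>
        L.insert (pvPlace ic.1 (rem * (rows + 1)) rows rem).2
          (L.getD (pvPlace ic.1 (rem * (rows + 1)) rows rem).2 [] ++
            [pvPad ic.2 (W.getD (pvPlace ic.1 (rem * (rows + 1)) rows rem).1 0)]))
      PySem.Dict.empty).getD r []
    = (PySem.List.pyRange 0 (pvK rows rem columns r) 1).map
        (fun c => pvPad (PySem.List.pyGetD data (pvStart rows rem c + r) "")
          (pvWidth data rows rem c)) := by
  obtain ⟨hk0, hkc⟩ := pv_k_bounds rows rem columns r hrem0 hremc h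
  have h1 := pv_getD_foldl_insert
    (fun (ic : Int × String) => (pvPlace ic.1 (rem * (rows + 1)) rows rem).2)
    (fun acc ic => acc ++ [pvPad ic.2 (W.getD (pvPlace ic.1 (rem * (rows + 1)) rows rem).1 0)])
    ([] : List String) (PySem.List.enumerate data) PySem.Dict.empty r
  simp only [] at h1
  rw [h1]
  rw [PySem.List.enumerate_eq_map_pyRange (d := "")]
  rw [List.filter_map, List.foldl_map]
  simp only [Function.comp_def]
  have hlen : PySem.List.len data = (data.length : Int) := rfl
  rw [hlen, pv_range_blocks data columns rows rem h hrows0 hrem0 hremc hid]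
  rw [List.filter_flatMap]
  have hbl : ∀ c' ∈ PySem.List.pyRange 0 columns 1,
      (pvBlock rows rem c').filter
          (fun j => (pvPlace j (rem * (rows + 1)) rows rem).2 == r)
        = if c' < pvK rows rem columns r then [pvStart rows rem c' + r] else [] := by
    intro c' hc'
    obtain ⟨h1', h2'⟩ := PySem.List.mem_pyRange_one.mp hc'
    rw [pv_block_filter_snd rows rem c' r hrows0 hrem0 h1' hr0]
    exact if_congr (pv_k_iff rows rem columns r c' hr0 hrn h1' h2') rfl rfl
  rw [List.flatMap_congr hbl]
  rw [PySem.List.pyRange_one_append 0 (pvK rows rem columns r) columns hk0 hkc]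
  rw [List.flatMap_append]
  have hfst : ∀ c' ∈ PySem.List.pyRange 0 (pvK rows rem columns r) 1,
      (if c' < pvK rows rem columns r then [pvStart rows rem c' + r] else [])
        = [pvStart rows rem c' + r] := by
    intro c' hc'
    obtain ⟨h1', h2'⟩ := PySem.List.mem_pyRange_one.mp hc'
    rw [if_pos h2']
  have hsnd : ∀ c' ∈ PySem.List.pyRange (pvK rows rem columns r) columns 1,
      (if c' < pvK rows rem columns r then [pvStart rows rem c' + r] else [])
        = ([] : List Int) := by
    intro c' hc'
    obtain ⟨h1', h2'⟩ := PySem.List.mem_pyRange_one.mp hc'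
    rw [if_neg (by omega)]
  rw [List.flatMap_congr hfst, List.flatMap_congr hsnd]
  rw [← List.map_eq_flatMap]
  have hnil : (PySem.List.pyRange (pvK rows rem columns r) columns 1).flatMap
      (fun _ => ([] : List Int)) = [] := by simp
  rw [hnil, List.append_nil]
  rw [List.foldl_map]
  have h2 := PySem.List.foldl_append_singleton_eq_map
    (f := fun c => pvPad (PySem.List.pyGetD data (pvStart rows rem c + r) "")
      (W.getD (pvPlace (pvStart rows rem c + r) (rem * (rows + 1)) rows rem).1 0))
    (l := PySem.List.pyRange 0 (pvK rows rem columns r) 1)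
    (acc := ([] : List String))
  simp only [List.nil_append] at h2
  rw [PySem.Dict.getD_empty, h2]
  refine List.map_congr_left (fun c hc => ?_)
  obtain ⟨hc0, hck⟩ := PySem.List.mem_pyRange_one.mp hc
  have hrl : r < pvLenC rows rem c :=
    (pv_k_iff rows rem columns r c hr0 hrn hc0 (by omega)).mpr hck
  rw [pv_place_spec rows rem c r hrows0 hrem0 hc0 hr0 hrl]
  rw [hW c hc0 (by omega)]

lemma pv_B_table (data : List String) (columns rows rem : Int) (h : 0 < columns)
    (hrows0 : 0 ≤ rows) (hrem0 : 0 ≤ rem) (hremc : rem < columns)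
    (hid : rows * columns + rem = (data.length : Int))
    (hdm : PySem.Int.divmod? (data.length : Int) columns = some (rows, rem)) :
    fold_list_py_alt data columns = pvTable data columns rows rem := by
  simp only [fold_list_py_alt, hdm]
  unfold pvTable
  refine List.map_congr_left (fun r hr => ?_)
  obtain ⟨hr0, hrn⟩ := PySem.List.mem_pyRange_one.mp hr
  rw [pv_lines data columns rows rem r _ h hrows0 hrem0 hremc hid hr0 hrn
    (fun c hc0 hcc => pv_widths data columns rows rem c h hrows0 hrem0 hremc hid hc0 hcc)]
  obtain ⟨hk0, hkc⟩ := pv_k_bounds rows rem columns r hrem0 hremc h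
  congr 1
  symm
  rw [PySem.List.pyRange_one_append 0 (pvK rows rem columns r) columns hk0 hkc,
    List.map_append]
  congr 1
  · refine List.map_congr_left (fun c hc => ?_)
    obtain ⟨hc0, hck⟩ := PySem.List.mem_pyRange_one.mp hc
    rw [if_pos ((pv_k_iff rows rem columns r c hr0 hrn hc0 (by omega)).mpr hck)]
  · have hM : ((((PySem.List.pyRange 0 (pvK rows rem columns r) 1).map
        (fun c => pvPad (PySem.List.pyGetD data (pvStart rows rem c + r) "")
          (pvWidth data rows rem c))).length : Int)) = pvK rows rem columns r := by
      rw [List.length_map, PySem.List.length_pyRange_one]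
      omega
    rw [hM]
    have hall : ∀ c ∈ PySem.List.pyRange (pvK rows rem columns r) columns 1,
        (if r < pvLenC rows rem c then
          pvPad (PySem.List.pyGetD data (pvStart rows rem c + r) "") (pvWidth data rows rem c)
        else "") = "" := by
      intro c hc
      obtain ⟨hc1, hc2⟩ := PySem.List.mem_pyRange_one.mp hc
      rw [if_neg]
      intro hlt
      exact absurd ((pv_k_iff rows rem columns r c hr0 hrn (by omega) hc2).mp hlt) (by omega)
    rw [List.map_congr_left hall, List.map_const', PySem.List.length_pyRange_one]

-- running max over a list of naturals, each decremented
lemma pvFoldlMaxSub (l : List Nat) : ∀ a : Nat, (l.map (fun x => x - 1)).foldl max (a - 1) = l.foldl max a - 1 := by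
  induction l with
  | nil => intro a; rfl
  | cons x l ih =>
    intro a
    simp only [List.map_cons, List.foldl_cons]
    have h : max (a - 1) (x - 1) = max a x - 1 := by omega
    rw [h, ih]

-- foldl max 0 picks the greatest element
lemma pvFoldlMaxEq (l : List Nat) (t : Nat) (ht : t ∈ l) (hle : ∀ x ∈ l, x ≤ t) :
    l.foldl max 0 = t := by
  have h1 := (PySem.List.le_foldl_max l 0).2 t ht
  rcases PySem.List.foldl_max_mem l 0 with h | h
  · omega
  · exact le_antisymm (hle _ h) h1

-- pvZipLongest over nonempty cols is the rows of padded lookups, one per index below the max length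
lemma pvZipLongest_eq (N : Nat) : ∀ cols : List (List String), cols ≠ [] →
    (cols.map List.length).foldl max 0 = N →
    pvZipLongest cols = (List.range N).map (fun r => cols.map (fun c => c.getD r "")) := by
  induction N with
  | zero =>
    intro cols hne hm
    have hall : ∀ c ∈ cols, c = [] := by
      intro c hc
      have := (PySem.List.le_foldl_max (cols.map List.length) 0).2 c.length
        (List.mem_map_of_mem hc)
      rw [hm] at this
      exact List.length_eq_zero_iff.mp (Nat.le_zero.mp this)
    rw [pvZipLongest]
    simp only [List.range_zero, List.map_nil]
    rw [if_pos]
    simp only [Bool.or_eq_true, List.all_eq_true, List.isEmpty_iff]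
    exact Or.inr hall
  | succ n ih =>
    intro cols hne hm
    have hex : ∃ c ∈ cols, c ≠ [] := by
      by_contra hno
      have hall : ∀ c ∈ cols, c = [] := fun c hc =>
        not_not.mp (fun hne' => hno ⟨c, hc, hne'⟩)
      have : (cols.map List.length).foldl max 0 = 0 := by
        rcases PySem.List.foldl_max_mem (cols.map List.length) 0 with h | h
        · exact h
        · obtain ⟨c, hc, hlen⟩ := List.mem_map.mp h
          rw [← hlen, hall c hc]; rfl
      omega
    obtain ⟨c0, hc0, hc0ne⟩ := hex
    rw [pvZipLongest, if_neg]
    · have htail : ((cols.map List.tail).map List.length).foldl max 0 = n := by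
        rw [List.map_map]
        have : cols.map (List.length ∘ List.tail) = (cols.map List.length).map (fun x => x - 1) := by
          rw [List.map_map]
          exact List.map_congr_left (fun c _ => List.length_tail)
        rw [this]
        have := pvFoldlMaxSub (cols.map List.length) 0
        simpa [hm] using this
      rw [ih (cols.map List.tail) (by simpa using hne) htail]
      rw [List.range_succ_eq_map]
      simp only [List.map_cons, List.map_map]
      congr 1
      · exact List.map_congr_left (fun c _ => by cases c <;> rfl)
      · refine List.map_congr_left (fun r _ => ?_)
        simp only [Function.comp]
        exact List.map_congr_left (fun c _ => by cases c <;> rfl)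
    · simp only [Bool.or_eq_true, List.all_eq_true, List.isEmpty_iff, not_or]
      exact ⟨hne, fun hall => hc0ne (hall c0 hc0)⟩

-- chunk c has rows + (1 if c < remainder else 0) entries
lemma pv_chunk_len (data : List String) (columns rows rem c : Int)
    (hrows0 : 0 ≤ rows) (hrem0 : 0 ≤ rem) (hremc : rem < columns)
    (hid : rows * columns + rem = (data.length : Int)) (hc0 : 0 ≤ c) (hcc : c < columns) :
    (PySem.List.slice data (some (c * rows + min c rem))
        (some ((c + 1) * rows + min (c + 1) rem))).length
      = (rows + (if c < rem then 1 else 0)).toNat := by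
  have hmul : (c + 1) * rows = c * rows + rows := by ring
  have hs0 : (0 : Int) ≤ c * rows + min c rem := pvStart_nonneg rows rem c hrows0 hrem0 hc0
  have hss : c * rows + min c rem ≤ (c + 1) * rows + min (c + 1) rem := by
    rw [hmul]; omega
  have hsn : (c + 1) * rows + min (c + 1) rem ≤ (data.length : Int) := by
    have hle := pv_start_le rows rem (c + 1) columns hrows0 hrem0 (by omega)
    unfold pvStart at hle
    omega
  rw [pv_slice_as_map data _ _ hs0 hss hsn, List.length_map, PySem.List.length_pyRange_one]
  split_ifs <;> omega

lemma pv_A_table (data : List String) (columns rows rem : Int) (h : 0 < columns)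
    (hrows0 : 0 ≤ rows) (hrem0 : 0 ≤ rem) (hremc : rem < columns)
    (hid : rows * columns + rem = (data.length : Int))
    (hdm : PySem.Int.divmod? (data.length : Int) columns = some (rows, rem)) :
    fold_list_py data columns = pvTable data columns rows rem := by
  unfold pvTable pvWidth pvLenC pvStart
  simp only [fold_list_py, hdm, List.map_map]
  simp only [Function.comp_def]
  have hrangene : PySem.List.pyRange 0 columns 1 ≠ [] := by
    intro he
    have := congrArg List.length he
    rw [PySem.List.length_pyRange_one] at this
    simp only [List.length_nil, sub_zero] at this
    omega
  have hmax : (((PySem.List.pyRange 0 columns 1).map (fun col =>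
        List.map (fun cell => pvPad cell ((PySem.List.max?
            (List.map PySem.Str.len (PySem.List.slice data (some (col * rows + min col rem))
              (some ((col + 1) * rows + min (col + 1) rem)))) (fun x => x)).getD 0))
          (PySem.List.slice data (some (col * rows + min col rem))
            (some ((col + 1) * rows + min (col + 1) rem))))).map List.length).foldl max 0
      = (rows + (if rem = 0 then (0 : Int) else 1)).toNat := by
    rw [List.map_map]
    refine pvFoldlMaxEq _ _ ?_ ?_
    · refine List.mem_map.mpr ⟨0, PySem.List.mem_pyRange_one.mpr ⟨le_refl 0, h⟩, ?_⟩
      simp only [Function.comp, List.length_map]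
      rw [pv_chunk_len data columns rows rem 0 hrows0 hrem0 hremc hid (le_refl 0) h]
      split_ifs <;> omega
    · intro x hx
      obtain ⟨c, hc, hcx⟩ := List.mem_map.mp hx
      obtain ⟨hc0, hcc⟩ := PySem.List.mem_pyRange_one.mp hc
      rw [← hcx]
      simp only [Function.comp, List.length_map]
      rw [pv_chunk_len data columns rows rem c hrows0 hrem0 hremc hid hc0 hcc]
      split_ifs <;> omega
  rw [pvZipLongest_eq _ _ (by simpa using hrangene) hmax]
  rw [PySem.List.pyRange_one 0 (rows + (if rem = 0 then (0 : Int) else 1))]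
  simp only [sub_zero, List.map_map]
  refine List.map_congr_left (fun r hr => ?_)
  have hrN : (r : Int) < rows + (if rem = 0 then (0 : Int) else 1) := by
    rw [List.mem_range] at hr
    split_ifs at hr ⊢ <;> omega
  simp only [Function.comp_def, zero_add]
  refine congrArg (PySem.Str.join " ") ?_
  refine List.map_congr_left (fun c hc => ?_)
  obtain ⟨hc0, hcc⟩ := PySem.List.mem_pyRange_one.mp hc
  have hmul : (c + 1) * rows = c * rows + rows := by ring
  have hs0 : (0 : Int) ≤ c * rows + min c rem := pvStart_nonneg rows rem c hrows0 hrem0 hc0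
  have hss : c * rows + min c rem ≤ (c + 1) * rows + min (c + 1) rem := by
    rw [hmul]; omega
  have hsn : (c + 1) * rows + min (c + 1) rem ≤ (data.length : Int) := by
    have hle := pv_start_le rows rem (c + 1) columns hrows0 hrem0 (by omega)
    unfold pvStart at hle
    omega
  have hlen := pv_chunk_len data columns rows rem c hrows0 hrem0 hremc hid hc0 hcc
  by_cases hk : (r : Int) < rows + (if c < rem then 1 else 0)
  · rw [if_pos hk]
    rw [pv_slice_as_map data _ _ hs0 hss hsn]
    rw [pv_slice_as_map data _ _ hs0 hss hsn] at hlen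
    have hkl : r < ((PySem.List.pyRange (c * rows + min c rem)
        ((c + 1) * rows + min (c + 1) rem) 1).map
          (fun j => PySem.List.pyGetD data j "")).length := by
      rw [List.length_map, PySem.List.length_pyRange_one] at hlen ⊢
      split_ifs at hlen <;> omega
    have hkl2 : r < (((PySem.List.pyRange (c * rows + min c rem)
        ((c + 1) * rows + min (c + 1) rem) 1).map
          (fun j => PySem.List.pyGetD data j "")).map
        (fun cell => pvPad cell ((PySem.List.max? (List.map PySem.Str.len
          ((PySem.List.pyRange (c * rows + min c rem)
            ((c + 1) * rows + min (c + 1) rem) 1).map (fun j => PySem.List.pyGetD data j "")))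
          (fun x => x)).getD 0))).length := by
      rw [List.length_map]; exact hkl
    rw [List.getD_eq_getElem _ "" hkl2, List.getElem_map, List.getElem_map,
      PySem.List.getElem_pyRange_one]
  · rw [if_neg hk]
    apply List.getD_eq_default
    rw [List.length_map, hlen]
    split_ifs at hk <;> omega

-- for columns < 0 the row count rows + [rem ≠ 0] is nonpositive
lemma pv_negrows (n columns rows rem : Int) (h : columns < 0) (hn : 0 ≤ n)
    (hid : rows * columns + rem = n) (hb : columns < rem ∧ rem ≤ 0) :
    rows + (if rem = 0 then (0 : Int) else 1) ≤ 0 := by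
  rcases lt_trichotomy rows 0 with h1 | h1 | h1
  · split_ifs <;> omega
  · subst h1
    split_ifs <;> omega
  · have h2 : rows * columns < 0 := mul_neg_of_pos_of_neg h1 h
    split_ifs <;> omega

-- negative columns: A's range is empty, B's row count is nonpositive — both return []
lemma pv_neg (data : List String) (columns : Int) (h : columns < 0) :
    fold_list_py data columns = [] ∧ fold_list_py_alt data columns = [] := by
  have hcol : columns ≠ 0 := ne_of_lt h
  have hdm : PySem.Int.divmod? (data.length : Int) columns
      = some (PySem.Int.floordiv (data.length : Int) columns,
              PySem.Int.mod (data.length : Int) columns) := by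
    simp [PySem.Int.divmod?, hcol, PySem.Int.floordiv, PySem.Int.mod]
  have hr : PySem.List.pyRange 0 columns 1 = [] := PySem.List.pyRange_one_eq_nil (le_of_lt h)
  have hid := PySem.Int.floordiv_mul_add_mod (data.length : Int) columns
  have hb := PySem.Int.mod_neg_bounds (data.length : Int) h
  have hn : (0 : Int) ≤ (data.length : Int) := Int.natCast_nonneg _
  have hzl : pvZipLongest ([] : List (List String)) = [] := by rw [pvZipLongest]; rfl
  constructor
  · simp only [fold_list_py, hdm, hr, List.map_nil]
    rw [hzl]
    rfl
  · simp only [fold_list_py_alt, hdm]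
    have hrows := pv_negrows (data.length : Int) columns
      (PySem.Int.floordiv (data.length : Int) columns)
      (PySem.Int.mod (data.length : Int) columns) h hn hid hb
    rw [PySem.List.pyRange_one_eq_nil hrows]
    rfl

-- ===== VERDICT (by name: the statement is the Claim_ definition above) =====
theorem fold_list_py_spec : Claim_equal_fold_list_py := by
  intro data columns _ hpre
  unfold Spec_fold_list_py
  rcases lt_trichotomy columns 0 with hlt | hz | hgt
  · rw [(pv_neg data columns hlt).1, (pv_neg data columns hlt).2]
  · exact absurd hz hpre
  · have hcol : columns ≠ 0 := ne_of_gt hgt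
    have hdm : PySem.Int.divmod? (data.length : Int) columns
        = some (PySem.Int.floordiv (data.length : Int) columns,
                PySem.Int.mod (data.length : Int) columns) := by
      simp [PySem.Int.divmod?, hcol, PySem.Int.floordiv, PySem.Int.mod]
    have hrows0 : 0 ≤ PySem.Int.floordiv (data.length : Int) columns := by
      rw [PySem.Int.floordiv_eq_ediv_of_pos hgt]
      exact Int.ediv_nonneg (Int.natCast_nonneg _) (le_of_lt hgt)
    have hrem0 : 0 ≤ PySem.Int.mod (data.length : Int) columns :=
      PySem.Int.mod_nonneg _ hgt
    have hremc : PySem.Int.mod (data.length : Int) columns < columns :=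
      PySem.Int.mod_lt _ hgt
    have hid := PySem.Int.floordiv_mul_add_mod (data.length : Int) columns
    rw [pv_A_table data columns _ _ hgt hrows0 hrem0 hremc hid hdm,
      pv_B_table data columns _ _ hgt hrows0 hrem0 hremc hid hdm]
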